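-- pv_equiv track=rewrite | github.com/gajo357/IntroToAlgorithms | Week7/PreprocessGraphModule.py | mark_component
-- ===== SOURCE A (Python) =====
-- def mark_component(G, node):
--     marked = {}
--     open_list = [node]
--     while len(open_list) > 0:
--         current_node = open_list.pop()
--         marked[current_node] = True
--         for neighbor in G[current_node]:
--             if neighbor not in marked:
--                 open_list.append(neighbor)
--
--     return marked
-- ===== SOURCE B (Python) =====
-- def mark_component(G, node):
--     # Recursive DFS: the explicit stack is replaced by the call stack; a node is
--     # marked when first visited. Neighbors are taken in reverse so the marking
--     # (dict insertion) order is identical to the stack version's pop order.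
--     marked = {}
--     def dfs(n):
--         marked[n] = True
--         for neighbor in reversed(G[n]):
--             if neighbor not in marked:
--                 dfs(neighbor)
--     dfs(node)
--     return marked
-- ===== Notes on version B (the rewrite author's own statement) =====
-- stated objective: idiomatic
-- what changed: Replaces the explicit worklist loop (filter-at-push, re-popping stale stack entries) by a recursive DFS helper that marks a node at visit time and recurses only into not-yet-marked neighbors, using the call stack instead of an explicit stack.
import Mathlib
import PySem

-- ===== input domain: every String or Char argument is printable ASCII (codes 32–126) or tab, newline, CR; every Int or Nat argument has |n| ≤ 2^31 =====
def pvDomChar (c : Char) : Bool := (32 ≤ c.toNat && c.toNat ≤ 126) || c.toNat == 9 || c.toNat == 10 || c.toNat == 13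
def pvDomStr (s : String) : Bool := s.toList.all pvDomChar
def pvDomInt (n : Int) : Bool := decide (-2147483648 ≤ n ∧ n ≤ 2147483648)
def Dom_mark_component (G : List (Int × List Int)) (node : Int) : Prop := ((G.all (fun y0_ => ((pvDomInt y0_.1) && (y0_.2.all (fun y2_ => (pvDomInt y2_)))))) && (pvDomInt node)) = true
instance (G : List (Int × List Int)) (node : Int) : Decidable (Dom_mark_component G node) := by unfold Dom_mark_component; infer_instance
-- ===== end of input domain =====

-- B replaces A's explicit worklist by a recursive DFS (call stack, mark at visit
-- time); same marking order, no speed claim.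

-- ===== PORT A =====
-- shared helper: the Python dict G; G[u] (first match; Pre_ guarantees the key
-- exists wherever either program looks one up — Python raises KeyError there)
def pvAdj (G : List (Int × List Int)) (u : Int) : List Int :=
  (((G.find? (fun p => p.1 == u)).map (fun p => p.2)).getD [])

-- the keys of G (Python's marked/lookup universe)
def pvKeys (G : List (Int × List Int)) : List Int := G.map (fun p => p.1)

-- fuel for A's while loop (a port artifact): 1 + Σ_{u ∈ distinct keys not yet
-- marked} (1 + len(G[u])) strictly bounds the number of loop iterations from a
-- state with marked-set M (proved below; the loop itself is fuel-free in Python)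
def pvWsum (G : List (Int × List Int)) (M : PySem.Dict Int Bool) : Nat :=
  (((pvKeys G).dedup.filter (fun u => !(M.contains u))).map
    (fun u => 1 + (pvAdj G u).length)).sum

-- A's while loop; the stack is kept top-first (Python appends/pops at the end)
def pvLoopA (G : List (Int × List Int)) : Nat → PySem.Dict Int Bool → List Int → PySem.Dict Int Bool
  | 0, M, _ => M
  | _ + 1, M, [] => M
  | f + 1, M, c :: S =>
      let M1 := M.insert c true
      pvLoopA G f M1 ((pvAdj G c).foldl (fun s nb => if M1.contains nb then s else nb :: s) S)

def mark_component (G : List (Int × List Int)) (node : Int) : List (Int × Bool) :=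
  (pvLoopA G (1 + pvWsum G PySem.Dict.empty) PySem.Dict.empty [node]).items

-- ===== PORT B =====
-- recursive dfs(n): mark n, then recurse into each unmarked neighbor (reversed
-- order); fuel bounds the recursion depth (≤ number of keys, proved below)
mutual
def pvDfs (G : List (Int × List Int)) : Nat → Int → PySem.Dict Int Bool → PySem.Dict Int Bool
  | 0, _, M => M
  | f + 1, n, M => pvDfsGo G f ((pvAdj G n).reverse) (M.insert n true)
termination_by f _ _ => (f, 0, 0)
def pvDfsGo (G : List (Int × List Int)) : Nat → List Int → PySem.Dict Int Bool → PySem.Dict Int Bool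
  | _, [], M => M
  | f, nb :: rest, M =>
      if M.contains nb then pvDfsGo G f rest M else pvDfsGo G f rest (pvDfs G f nb M)
termination_by f l _ => (f, 1, l.length)
end

def mark_component_alt (G : List (Int × List Int)) (node : Int) : List (Int × Bool) :=
  (pvDfs G (G.length + 1) node PySem.Dict.empty).items

-- ===== PRECONDITION & SPEC =====
-- one closure step: a node set together with all its listed neighbors
def pvStep (G : List (Int × List Int)) (R : List Int) : List Int :=
  (R ++ R.flatMap (fun u => pvAdj G u)).dedup

-- everything reachable from node (|G| + 1 steps reach the closure, proved below)
def pvReach (G : List (Int × List Int)) (node : Int) : List Int :=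
  (pvStep G)^[G.length + 1] [node]

-- Pre_ excludes exactly the inputs on which A raises KeyError: some node
-- reachable from the start node (the start node itself included) is not a key
-- of G, so the dict lookup G[current_node] fails when it is popped.
def Pre_mark_component (G : List (Int × List Int)) (node : Int) : Prop :=
  ∀ u ∈ pvReach G node, u ∈ pvKeys G
instance (G : List (Int × List Int)) (node : Int) : Decidable (Pre_mark_component G node) := by unfold Pre_mark_component; infer_instance

def pvWitness_mark_component : (List (Int × List Int)) × Int := ([(0, [1, 2]), (1, [0]), (2, [])], 0)

def Spec_mark_component (G : List (Int × List Int)) (node : Int) (out : List (Int × Bool)) : Prop := out = mark_component_alt G node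
instance (G : List (Int × List Int)) (node : Int) (out : List (Int × Bool)) : Decidable (Spec_mark_component G node out) := by unfold Spec_mark_component; infer_instance

-- ===== CLAIM (what is proved, stated in full; the proofs are below) =====
def Claim_equal_mark_component : Prop := ∀ (G : List (Int × List Int)) (node : Int), Dom_mark_component G node → Pre_mark_component G node → Spec_mark_component G node (mark_component G node)

-- ===== LEMMAS AND PROOFS =====

-- proof-side: all stack/pending entries stay inside the reach set R
def pvSC (R : List Int) (S : List Int) : Prop := ∀ c ∈ S, c ∈ R
-- dict invariant: every stored value is true (Python only ever writes True)
def pvMinv (M : PySem.Dict Int Bool) : Prop := ∀ p ∈ M.items, p.2 = true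

-- number of unmarked keys (bounds B's recursion depth)
def pvNu (G : List (Int × List Int)) (M : PySem.Dict Int Bool) : Nat :=
  ((pvKeys G).dedup.filter (fun u => !(M.contains u))).length

-- canonical pending-list loop: B's recursion with the continuation made explicit
def pvLoopL (G : List (Int × List Int)) : Nat → PySem.Dict Int Bool → List Int → PySem.Dict Int Bool
  | 0, M, _ => M
  | _ + 1, M, [] => M
  | f + 1, M, c :: S =>
      if M.contains c then pvLoopL G f M S
      else pvLoopL G f (M.insert c true) ((pvAdj G c).reverse ++ S)

def pvMu (G : List (Int × List Int)) (M : PySem.Dict Int Bool) (S : List Int) : Nat :=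
  S.length + pvWsum G M

def pvRun (G : List (Int × List Int)) (M : PySem.Dict Int Bool) (S : List Int) : PySem.Dict Int Bool :=
  pvLoopL G (pvMu G M S) M S

-- A's stack sans marked stale entries relates to B's full pending list
inductive PvRel (M : PySem.Dict Int Bool) : List Int → List Int → Prop
  | nil : PvRel M [] []
  | cons (c : Int) (sa sb : List Int) : PvRel M sa sb → PvRel M (c :: sa) (c :: sb)
  | drop (c : Int) (sa sb : List Int) : M.contains c = true → PvRel M sa sb → PvRel M sa (c :: sb)

-- A's positional invariant: a marked entry's neighbors are marked or above it
def pvGood (G : List (Int × List Int)) (M : PySem.Dict Int Bool) (S : List Int) : Prop :=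
  ∀ pre c post, S = pre ++ c :: post → M.contains c = true →
    ∀ d ∈ pvAdj G c, M.contains d = true ∨ d ∈ pre

-- ---- small dict facts ----
theorem pv_insert_noop {M : PySem.Dict Int Bool} {c : Int} (hM : pvMinv M)
    (hc : M.contains c = true) : M.insert c true = M := by
  apply PySem.Dict.ext
  rw [PySem.Dict.items_insert_of_contains M true hc]
  have h : ∀ p ∈ M.items, (if (p.1 == c) = true then ((c : Int), true) else p) = id p := by
    intro p hp
    obtain ⟨p1, p2⟩ := p
    have hv := hM _ hp
    simp only at hv
    subst hv
    by_cases h : p1 = c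
    · simp [h]
    · simp [h]
  rw [List.map_congr_left h, List.map_id]

theorem pv_minv_insert {M : PySem.Dict Int Bool} {c : Int} (hM : pvMinv M) :
    pvMinv (M.insert c true) := by
  intro p hp
  rcases (PySem.Dict.mem_items_insert M c true p).mp hp with h | h
  · simp [h]
  · exact hM _ h.1

theorem pv_contains_insert_mono {M : PySem.Dict Int Bool} {c x : Int}
    (h : M.contains x = true) : (M.insert c true).contains x = true := by
  rw [PySem.Dict.contains_insert]; simp [h]

-- ---- wsum / nu arithmetic ----
theorem pv_sum_filter_insert {M : PySem.Dict Int Bool} {c : Int} (f : Int → Nat)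
    (hc : M.contains c = false) :
    ∀ l : List Int, l.Nodup → c ∈ l →
      ((l.filter (fun u => !(M.insert c true).contains u)).map f).sum + f c
        = ((l.filter (fun u => !M.contains u)).map f).sum := by
  intro l
  induction l with
  | nil => intro _ h; cases h
  | cons a t ih =>
    intro hnd hmem
    have hndt := (List.nodup_cons.mp hnd).2
    have hna := (List.nodup_cons.mp hnd).1
    by_cases hac : a = c
    · subst hac
      have hpa : (!(M.insert a true).contains a) = false := by
        simp [PySem.Dict.contains_insert_self]
      have hpb : (!M.contains a) = true := by simp [hc]
      rw [List.filter_cons, List.filter_cons, hpa, hpb]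
      simp only [Bool.false_eq_true, if_false, if_true]
      have h3 : t.filter (fun u => !(M.insert a true).contains u)
          = t.filter (fun u => !M.contains u) := by
        apply List.filter_congr
        intro u hu
        rw [PySem.Dict.contains_insert]
        have hne : u ≠ a := fun h => hna (h ▸ hu)
        simp [hne]
      rw [h3]
      simp [Nat.add_comm]
    · have hmem' : c ∈ t := by
        rcases List.mem_cons.mp hmem with h | h
        · exact absurd h.symm hac
        · exact h
      have hpa : (!(M.insert c true).contains a) = (!M.contains a) := by
        rw [PySem.Dict.contains_insert]
        simp [hac]
      rw [List.filter_cons, List.filter_cons, hpa]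
      by_cases ha : M.contains a = true
      · rw [show (!M.contains a) = false by simp [ha]]
        simp only [Bool.false_eq_true, if_false]
        exact ih hndt hmem'
      · have ha' : M.contains a = false := by simpa using ha
        rw [show (!M.contains a) = true by simp [ha']]
        simp only [if_true, List.map_cons, List.sum_cons]
        have := ih hndt hmem'
        omega

theorem pv_wsum_insert_new (G : List (Int × List Int)) {M : PySem.Dict Int Bool}
    {c : Int} (hk : c ∈ pvKeys G) (hc : M.contains c = false) :
    pvWsum G (M.insert c true) + (1 + (pvAdj G c).length) = pvWsum G M := by
  unfold pvWsum
  exact pv_sum_filter_insert _ hc _ (List.nodup_dedup _) (List.mem_dedup.mpr hk)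

theorem pv_len_eq_sum : ∀ l : List Int, l.length = (l.map (fun _ => (1:Nat))).sum := by
  intro l
  induction l with
  | nil => rfl
  | cons a t ih => simp only [List.length_cons, List.map_cons, List.sum_cons, ih]; omega

theorem pv_nu_eq_sum (G : List (Int × List Int)) (M : PySem.Dict Int Bool) :
    pvNu G M = (((pvKeys G).dedup.filter (fun u => !(M.contains u))).map
      (fun _ => (1:Nat))).sum := by
  unfold pvNu
  exact pv_len_eq_sum _

theorem pv_nu_insert_new (G : List (Int × List Int)) {M : PySem.Dict Int Bool}
    {c : Int} (hk : c ∈ pvKeys G) (hc : M.contains c = false) :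
    pvNu G (M.insert c true) + 1 = pvNu G M := by
  rw [pv_nu_eq_sum, pv_nu_eq_sum]
  exact pv_sum_filter_insert (fun _ => 1) hc _ (List.nodup_dedup _) (List.mem_dedup.mpr hk)

theorem pv_nu_mono (G : List (Int × List Int)) {M M' : PySem.Dict Int Bool}
    (h : ∀ x, M.contains x = true → M'.contains x = true) :
    pvNu G M' ≤ pvNu G M := by
  unfold pvNu
  induction ((pvKeys G).dedup) with
  | nil => simp
  | cons a t ih =>
    simp only [List.filter_cons]
    by_cases ha : M.contains a = true
    · have := h a ha
      simp [ha, this]; omega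
    · have ha' : M.contains a = false := by simpa using ha
      by_cases hb : M'.contains a = true
      · simp [ha', hb]; omega
      · have hb' : M'.contains a = false := by simpa using hb
        simp [ha', hb']; omega

theorem pv_nu_pos (G : List (Int × List Int)) {M : PySem.Dict Int Bool} {c : Int}
    (hk : c ∈ pvKeys G) (hc : M.contains c = false) : 1 ≤ pvNu G M := by
  unfold pvNu
  have : c ∈ (pvKeys G).dedup.filter (fun u => !(M.contains u)) :=
    List.mem_filter.mpr ⟨List.mem_dedup.mpr hk, by simp [hc]⟩
  exact List.length_pos_of_mem this

theorem pv_dfs_zero (G : List (Int × List Int)) (n : Int) (M : PySem.Dict Int Bool) :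
    pvDfs G 0 n M = M := by simp [pvDfs]

theorem pv_dfs_succ (G : List (Int × List Int)) (f : Nat) (n : Int) (M : PySem.Dict Int Bool) :
    pvDfs G (f + 1) n M = pvDfsGo G f ((pvAdj G n).reverse) (M.insert n true) := by
  simp [pvDfs]

theorem pv_dfsGo_nil (G : List (Int × List Int)) (f : Nat) (M : PySem.Dict Int Bool) :
    pvDfsGo G f [] M = M := by simp [pvDfsGo]

theorem pv_dfsGo_cons (G : List (Int × List Int)) (f : Nat) (nb : Int) (rest : List Int)
    (M : PySem.Dict Int Bool) :
    pvDfsGo G f (nb :: rest) M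
      = if M.contains nb then pvDfsGo G f rest M else pvDfsGo G f rest (pvDfs G f nb M) := by
  simp [pvDfsGo]

-- ---- dfs preserves the invariants ----
theorem pv_dfsGo_inv (G : List (Int × List Int)) (f : Nat)
    (hP : ∀ n (M : PySem.Dict Int Bool), pvMinv M →
      pvMinv (pvDfs G f n M) ∧
      (∀ x, M.contains x = true → (pvDfs G f n M).contains x = true)) :
    ∀ L (M : PySem.Dict Int Bool), pvMinv M →
      pvMinv (pvDfsGo G f L M) ∧
      (∀ x, M.contains x = true → (pvDfsGo G f L M).contains x = true) := by
  intro L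
  induction L with
  | nil => intro M hM; exact ⟨by simpa [pv_dfsGo_nil] using hM, by intro x hx; simpa [pv_dfsGo_nil] using hx⟩
  | cons nb rest ih =>
    intro M hM
    by_cases hc : M.contains nb = true
    · rw [show pvDfsGo G f (nb :: rest) M = pvDfsGo G f rest M by rw [pv_dfsGo_cons, if_pos hc]]
      exact ih M hM
    · have hc' : M.contains nb = false := by simpa using hc
      rw [show pvDfsGo G f (nb :: rest) M = pvDfsGo G f rest (pvDfs G f nb M) by
        rw [pv_dfsGo_cons, if_neg (by simp [hc'])]]
      rcases hP nb M hM with ⟨h1, h2⟩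
      rcases ih _ h1 with ⟨h3, h4⟩
      exact ⟨h3, fun x hx => h4 x (h2 x hx)⟩

theorem pv_dfs_inv (G : List (Int × List Int)) :
    ∀ (f : Nat) n (M : PySem.Dict Int Bool), pvMinv M →
      pvMinv (pvDfs G f n M) ∧
      (∀ x, M.contains x = true → (pvDfs G f n M).contains x = true) := by
  intro f
  induction f with
  | zero => intro n M hM; exact ⟨by simpa [pv_dfs_zero] using hM, by intro x hx; simpa [pv_dfs_zero] using hx⟩
  | succ f ih =>
    intro n M hM
    rw [pv_dfs_succ]
    rcases pv_dfsGo_inv G f (fun n M hM => ih n M hM) _ _ (pv_minv_insert hM) with ⟨h1, h2⟩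
    exact ⟨h1, fun x hx => h2 x (pv_contains_insert_mono hx)⟩

-- ---- loopL fuel machinery ----
theorem pv_loopL_nil (G : List (Int × List Int)) (f : Nat) (M : PySem.Dict Int Bool) :
    pvLoopL G f M [] = M := by cases f <;> rfl

theorem pv_loopL_stable (G : List (Int × List Int)) (R : List Int) (hRk : ∀ u ∈ R, u ∈ pvKeys G) (hRc : ∀ u ∈ R, ∀ d ∈ pvAdj G u, d ∈ R) :
    ∀ (f : Nat) (M : PySem.Dict Int Bool) (S : List Int), pvSC R S →
      pvMu G M S ≤ f → pvLoopL G (f + 1) M S = pvLoopL G f M S := by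
  intro f
  induction f with
  | zero =>
    intro M S _ hmu
    have : S = [] := by
      cases S with
      | nil => rfl
      | cons a t => exfalso; unfold pvMu at hmu; simp at hmu
    subst this; rw [pv_loopL_nil, pv_loopL_nil]
  | succ f ih =>
    intro M S hSC hmu
    cases S with
    | nil => rw [pv_loopL_nil, pv_loopL_nil]
    | cons c S' =>
      by_cases hc : M.contains c = true
      · rw [show pvLoopL G (f+1+1) M (c::S') = pvLoopL G (f+1) M S' by simp [pvLoopL, hc],
            show pvLoopL G (f+1) M (c::S') = pvLoopL G f M S' by simp [pvLoopL, hc]]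
        apply ih _ _ (fun x hx => hSC x (List.mem_cons_of_mem _ hx))
        unfold pvMu at hmu ⊢; simp at hmu; omega
      · have hc' : M.contains c = false := by simpa using hc
        rw [show pvLoopL G (f+1+1) M (c::S') = pvLoopL G (f+1) (M.insert c true) ((pvAdj G c).reverse ++ S') by simp [pvLoopL, hc'],
            show pvLoopL G (f+1) M (c::S') = pvLoopL G f (M.insert c true) ((pvAdj G c).reverse ++ S') by simp [pvLoopL, hc']]
        have hck : c ∈ R := hSC c (List.mem_cons_self)
        have hw := pv_wsum_insert_new G (hRk c hck) hc'
        apply ih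
        · intro x hx
          rcases List.mem_append.mp hx with h | h
          · exact hRc c hck x (List.mem_reverse.mp h)
          · exact hSC x (List.mem_cons_of_mem _ h)
        · unfold pvMu at hmu ⊢
          simp at hmu ⊢
          omega

theorem pv_loopL_add (G : List (Int × List Int)) (R : List Int) (hRk : ∀ u ∈ R, u ∈ pvKeys G) (hRc : ∀ u ∈ R, ∀ d ∈ pvAdj G u, d ∈ R) :
    ∀ (k f : Nat) (M : PySem.Dict Int Bool) (S : List Int), pvSC R S →
      pvMu G M S ≤ f → pvLoopL G (f + k) M S = pvLoopL G f M S := by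
  intro k
  induction k with
  | zero => intro f M S _ _; rfl
  | succ k ih =>
    intro f M S hSC hmu
    rw [show f + (k+1) = (f + k) + 1 by omega]
    rw [pv_loopL_stable G R hRk hRc _ _ _ hSC (le_trans hmu (Nat.le_add_right _ _))]
    exact ih f M S hSC hmu

theorem pv_loopL_run (G : List (Int × List Int)) (R : List Int) (hRk : ∀ u ∈ R, u ∈ pvKeys G) (hRc : ∀ u ∈ R, ∀ d ∈ pvAdj G u, d ∈ R)
    {f : Nat} {M : PySem.Dict Int Bool} {S : List Int} (hSC : pvSC R S)
    (hmu : pvMu G M S ≤ f) : pvLoopL G f M S = pvRun G M S := by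
  unfold pvRun
  rw [show f = pvMu G M S + (f - pvMu G M S) by omega]
  exact pv_loopL_add G R hRk hRc _ _ _ _ hSC (le_refl _)

-- one canonical step of the pending loop
theorem pv_run_skip (G : List (Int × List Int)) (R : List Int) (hRk : ∀ u ∈ R, u ∈ pvKeys G) (hRc : ∀ u ∈ R, ∀ d ∈ pvAdj G u, d ∈ R)
    {M : PySem.Dict Int Bool} {c : Int} {S : List Int} (hSC : pvSC R (c :: S))
    (hc : M.contains c = true) : pvRun G M (c :: S) = pvRun G M S := by
  have h1 : pvMu G M (c :: S) = pvMu G M S + 1 := by unfold pvMu; simp; omega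
  unfold pvRun
  rw [h1, show pvLoopL G (pvMu G M S + 1) M (c::S) = pvLoopL G (pvMu G M S) M S by
    simp [pvLoopL, hc]]

theorem pv_run_visit (G : List (Int × List Int)) (R : List Int) (hRk : ∀ u ∈ R, u ∈ pvKeys G) (hRc : ∀ u ∈ R, ∀ d ∈ pvAdj G u, d ∈ R)
    {M : PySem.Dict Int Bool} {c : Int} {S : List Int} (hSC : pvSC R (c :: S))
    (hc : M.contains c = false) :
    pvRun G M (c :: S) = pvRun G (M.insert c true) ((pvAdj G c).reverse ++ S) := by
  have hck : c ∈ R := hSC c (List.mem_cons_self)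
  have hw := pv_wsum_insert_new G (hRk c hck) hc
  have hSC' : pvSC R ((pvAdj G c).reverse ++ S) := by
    intro x hx
    rcases List.mem_append.mp hx with h | h
    · exact hRc c hck x (List.mem_reverse.mp h)
    · exact hSC x (List.mem_cons_of_mem _ h)
  have h1 : pvMu G M (c :: S) = pvMu G (M.insert c true) ((pvAdj G c).reverse ++ S) + 2 := by
    unfold pvMu at *; simp at *; omega
  conv_lhs => unfold pvRun
  rw [h1, show pvLoopL G (pvMu G (M.insert c true) ((pvAdj G c).reverse ++ S) + 2) M (c::S)
      = pvLoopL G (pvMu G (M.insert c true) ((pvAdj G c).reverse ++ S) + 1) (M.insert c true) ((pvAdj G c).reverse ++ S) by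
    simp [pvLoopL, hc]]
  rw [pv_loopL_stable G R hRk hRc _ _ _ hSC' (le_refl _)]
  exact pv_loopL_run G R hRk hRc hSC' (le_refl _)

theorem pv_run_nil (G : List (Int × List Int)) (M : PySem.Dict Int Bool) :
    pvRun G M [] = M := pv_loopL_nil G _ M

-- ---- bridge: B's recursion = the pending loop ----
theorem pv_bridge_go (G : List (Int × List Int)) (R : List Int) (hRk : ∀ u ∈ R, u ∈ pvKeys G) (hRc : ∀ u ∈ R, ∀ d ∈ pvAdj G u, d ∈ R) (f : Nat)
    (hP : ∀ n (M : PySem.Dict Int Bool) S, pvMinv M → n ∈ R → pvSC R S →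
      M.contains n = false → pvNu G M ≤ f →
      pvRun G M (n :: S) = pvRun G (pvDfs G f n M) S) :
    ∀ L (M : PySem.Dict Int Bool) S, pvMinv M → pvSC R L → pvSC R S → pvNu G M ≤ f →
      pvRun G M (L ++ S) = pvRun G (pvDfsGo G f L M) S := by
  intro L
  induction L with
  | nil => intro M S _ _ _ _; rw [List.nil_append, pv_dfsGo_nil]
  | cons nb L' ih =>
    intro M S hM hL hS hnu
    have hLS : pvSC R (nb :: (L' ++ S)) := by
      intro x hx
      rcases List.mem_cons.mp hx with h | h
      · exact h ▸ hL nb (List.mem_cons_self)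
      · rcases List.mem_append.mp h with h | h
        · exact hL x (List.mem_cons_of_mem _ h)
        · exact hS x h
    by_cases hc : M.contains nb = true
    · rw [show (nb :: L') ++ S = nb :: (L' ++ S) from rfl,
          pv_run_skip G R hRk hRc hLS hc,
          show pvDfsGo G f (nb :: L') M = pvDfsGo G f L' M by rw [pv_dfsGo_cons, if_pos hc]]
      exact ih M S hM (fun x hx => hL x (List.mem_cons_of_mem _ hx)) hS hnu
    · have hc' : M.contains nb = false := by simpa using hc
      rw [show (nb :: L') ++ S = nb :: (L' ++ S) from rfl,
          hP nb M (L' ++ S) hM (hL nb List.mem_cons_self) (fun x hx => hLS x (List.mem_cons_of_mem _ hx)) hc' hnu,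
          show pvDfsGo G f (nb :: L') M = pvDfsGo G f L' (pvDfs G f nb M) by
            rw [pv_dfsGo_cons, if_neg (by simp [hc'])]]
      rcases pv_dfs_inv G f nb M hM with ⟨h1, h2⟩
      exact ih _ S h1 (fun x hx => hL x (List.mem_cons_of_mem _ hx)) hS
        (le_trans (pv_nu_mono G h2) hnu)

theorem pv_bridge (G : List (Int × List Int)) (R : List Int) (hRk : ∀ u ∈ R, u ∈ pvKeys G) (hRc : ∀ u ∈ R, ∀ d ∈ pvAdj G u, d ∈ R) :
    ∀ (f : Nat) n (M : PySem.Dict Int Bool) S, pvMinv M → n ∈ R → pvSC R S →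
      M.contains n = false → pvNu G M ≤ f →
      pvRun G M (n :: S) = pvRun G (pvDfs G f n M) S := by
  intro f
  induction f with
  | zero =>
    intro n M S _ hk _ hc hnu
    exact absurd hnu (by have := pv_nu_pos G (hRk n hk) hc; omega)
  | succ f ih =>
    intro n M S hM hk hS hc hnu
    have hSC : pvSC R (n :: S) := by
      intro x hx
      rcases List.mem_cons.mp hx with h | h
      · exact h ▸ hk
      · exact hS x h
    rw [pv_run_visit G R hRk hRc hSC hc, pv_dfs_succ]
    have hnu' : pvNu G (M.insert n true) ≤ f := by
      have := pv_nu_insert_new G (hRk n hk) hc; omega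
    exact pv_bridge_go G R hRk hRc f ih _ _ _ (pv_minv_insert hM)
      (fun x hx => hRc n hk x (List.mem_reverse.mp hx)) hS hnu'

-- ---- Rel / Good lemmas ----
theorem pv_rel_mono {M M' : PySem.Dict Int Bool}
    (h : ∀ x, M.contains x = true → M'.contains x = true) :
    ∀ {sa sb : List Int}, PvRel M sa sb → PvRel M' sa sb := by
  intro sa sb hrel
  induction hrel with
  | nil => exact PvRel.nil
  | cons c sa sb _ ih => exact PvRel.cons c _ _ ih
  | drop c sa sb hc _ ih => exact PvRel.drop c _ _ (h _ hc) ih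

theorem pv_rel_filter (M : PySem.Dict Int Bool) :
    ∀ l : List Int, PvRel M (l.filter (fun d => !(M.contains d))) l := by
  intro l
  induction l with
  | nil => exact PvRel.nil
  | cons a t ih =>
    by_cases ha : M.contains a = true
    · rw [show (a :: t).filter (fun d => !(M.contains d)) = t.filter (fun d => !(M.contains d)) by
        simp [List.filter_cons, ha]]
      exact PvRel.drop a _ _ ha ih
    · have ha' : M.contains a = false := by simpa using ha
      rw [show (a :: t).filter (fun d => !(M.contains d)) = a :: t.filter (fun d => !(M.contains d)) by
        simp [List.filter_cons, ha']]
      exact PvRel.cons a _ _ ih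

theorem pv_rel_append {M : PySem.Dict Int Bool} :
    ∀ {a b a' b' : List Int}, PvRel M a b → PvRel M a' b' → PvRel M (a ++ a') (b ++ b') := by
  intro a b a' b' h1 h2
  induction h1 with
  | nil => exact h2
  | cons c sa sb _ ih => exact PvRel.cons c _ _ ih
  | drop c sa sb hc _ ih => exact PvRel.drop c _ _ hc ih

theorem pv_good_tail {G : List (Int × List Int)} {M : PySem.Dict Int Bool} {c : Int}
    {S : List Int} (hG : pvGood G M (c :: S)) (hc : M.contains c = true) :
    pvGood G M S := by
  intro pre d post hsplit hd e he
  rcases hG (c :: pre) d post (by simp [hsplit]) hd e he with h | h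
  · exact Or.inl h
  · rcases List.mem_cons.mp h with h | h
    · exact Or.inl (h ▸ hc)
    · exact Or.inr h

theorem pv_good_step {G : List (Int × List Int)} {M : PySem.Dict Int Bool} {c : Int}
    {sa : List Int} (hG : pvGood G M (c :: sa)) (hc : M.contains c = false) :
    pvGood G (M.insert c true)
      (((pvAdj G c).filter (fun d => !((M.insert c true).contains d))).reverse ++ sa) := by
  intro pre d post hsplit hd e he
  -- from the old Good at position (c :: t), for a marked entry d of sa with prefix pre
  have main : ∀ t : List Int, sa = t ++ d :: post →
      (((pvAdj G c).filter (fun x => !((M.insert c true).contains x))).reverse ++ t).Sublist pre →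
      (M.insert c true).contains e = true ∨ e ∈ pre := by
    intro t ht hsub
    have hd' : (d == c || M.contains d) = true := by
      rw [← PySem.Dict.contains_insert]; exact hd
    by_cases hdc : M.contains d = true
    · rcases hG (c :: t) d post (by simp [ht]) hdc e he with h | h
      · exact Or.inl (pv_contains_insert_mono h)
      · rcases List.mem_cons.mp h with h | h
        · exact Or.inl (h ▸ PySem.Dict.contains_insert_self _ _ _)
        · exact Or.inr (hsub.mem (List.mem_append.mpr (Or.inr h)))
    · have hdc2 : d = c := by
        rcases Bool.or_eq_true_iff.mp hd' with h | h
        · exact eq_of_beq h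
        · exact absurd h hdc
      subst hdc2
      by_cases hec : (M.insert d true).contains e = true
      · exact Or.inl hec
      · have hec' : (!(M.insert d true).contains e) = true := by simpa using hec
        exact Or.inr (hsub.mem (List.mem_append.mpr (Or.inl
          (List.mem_reverse.mpr (List.mem_filter.mpr ⟨he, hec'⟩)))))
  rcases List.append_eq_append_iff.mp hsplit.symm with ⟨t, ht1, ht2⟩ | ⟨t, ht1, ht2⟩
  · -- filtRev = pre ++ t and d :: post = t ++ sa: d on the boundary or inside filtRev
    cases t with
    | nil =>
      -- sa = d :: post and pre = filtRev
      simp only [List.nil_append] at ht2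
      simp only [List.append_nil] at ht1
      exact main [] (by simp [ht2]) (by rw [List.append_nil, ht1])
    | cons d' t' =>
      exfalso
      have hdmem : d ∈ ((pvAdj G c).filter (fun x => !((M.insert c true).contains x))).reverse := by
        rw [ht1]
        have hdd : d = d' := by
          have h2 : d :: post = d' :: (t' ++ sa) := ht2
          exact (List.cons_eq_cons.mp h2).1
        exact List.mem_append.mpr (Or.inr (hdd ▸ List.mem_cons_self))
      have := (List.mem_filter.mp (List.mem_reverse.mp hdmem)).2
      rw [hd] at this
      simp at this
  · -- pre = filtRev ++ t and sa = t ++ d :: post: d is an entry of the old stack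
    exact main t ht2 (by rw [ht1])

-- ---- A's push loop, explicitly ----
theorem pv_foldl_push (M : PySem.Dict Int Bool) :
    ∀ (l S : List Int),
      l.foldl (fun s nb => if M.contains nb then s else nb :: s) S
        = (l.filter (fun nb => !(M.contains nb))).reverse ++ S := by
  intro l
  induction l with
  | nil => intro S; simp
  | cons a t ih =>
    intro S
    by_cases ha : M.contains a = true
    · simp [List.foldl_cons, ha, List.filter_cons, ih]
    · have ha' : M.contains a = false := by simpa using ha
      simp [List.foldl_cons, ha', List.filter_cons, ih]

theorem pv_foldl_push_marked (M : PySem.Dict Int Bool) {l : List Int}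
    (h : ∀ nb ∈ l, M.contains nb = true) (S : List Int) :
    l.foldl (fun s nb => if M.contains nb then s else nb :: s) S = S := by
  rw [pv_foldl_push]
  have : l.filter (fun nb => !(M.contains nb)) = [] := by
    apply List.filter_eq_nil_iff.mpr
    intro nb hnb
    simp [h nb hnb]
  rw [this]; rfl

-- ---- the simulation: A's stack loop = the pending loop ----
theorem pv_sim (G : List (Int × List Int)) (R : List Int) (hRk : ∀ u ∈ R, u ∈ pvKeys G) (hRc : ∀ u ∈ R, ∀ d ∈ pvAdj G u, d ∈ R) :
    ∀ (k : Nat) (M : PySem.Dict Int Bool) (SA SB : List Int) (fA : Nat),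
      pvMinv M → pvSC R SB → PvRel M SA SB → pvGood G M SA →
      pvMu G M SA ≤ fA → pvMu G M SB ≤ k →
      pvLoopA G fA M SA = pvRun G M SB := by
  intro k
  induction k with
  | zero =>
    intro M SA SB fA _ _ hrel _ _ hk
    have hSB : SB = [] := by
      cases SB with
      | nil => rfl
      | cons a t => exfalso; unfold pvMu at hk; simp at hk
    subst hSB
    cases hrel
    rw [pv_run_nil]
    cases fA <;> rfl
  | succ k ih =>
    intro M SA SB fA hM hSC hrel hG hfA hk
    cases hrel with
    | nil =>
      rw [pv_run_nil]
      cases fA <;> rfl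
    | cons c sa sb hrel' =>
      have hfA1 : 1 ≤ fA := by unfold pvMu at hfA; simp at hfA; omega
      obtain ⟨f, rfl⟩ : ∃ f, fA = f + 1 := ⟨fA - 1, by omega⟩
      have hSCsb : pvSC R sb := fun x hx => hSC x (List.mem_cons_of_mem _ hx)
      by_cases hc : M.contains c = true
      · -- stale entry: A re-marks (no-op) and pushes nothing; B skips
        have hnoop : M.insert c true = M := pv_insert_noop hM hc
        have hall : ∀ nb ∈ pvAdj G c, M.contains nb = true := by
          intro nb hnb
          rcases hG [] c sa rfl hc nb hnb with h | h
          · exact h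
          · cases h
        rw [show pvLoopA G (f+1) M (c :: sa)
            = pvLoopA G f (M.insert c true)
                ((pvAdj G c).foldl (fun s nb => if (M.insert c true).contains nb then s else nb :: s) sa) from rfl,
            hnoop, pv_foldl_push_marked M hall,
            pv_run_skip G R hRk hRc hSC hc]
        apply ih M sa sb f hM hSCsb hrel' (pv_good_tail hG hc)
        · unfold pvMu at hfA ⊢; simp at hfA ⊢; omega
        · unfold pvMu at hk ⊢; simp at hk ⊢; omega
      · -- fresh node: both mark it; A pushes the unmarked neighbors, B all of them
        have hc' : M.contains c = false := by simpa using hc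
        have hck : c ∈ R := hSC c List.mem_cons_self
        have hw := pv_wsum_insert_new G (hRk c hck) hc'
        rw [show pvLoopA G (f+1) M (c :: sa)
            = pvLoopA G f (M.insert c true)
                ((pvAdj G c).foldl (fun s nb => if (M.insert c true).contains nb then s else nb :: s) sa) from rfl,
            pv_foldl_push, pv_run_visit G R hRk hRc hSC hc']
        have hrev : ((pvAdj G c).filter (fun nb => !((M.insert c true).contains nb))).reverse
            = ((pvAdj G c).reverse).filter (fun nb => !((M.insert c true).contains nb)) := by
          rw [List.filter_reverse]
        apply ih (M.insert c true) _ _ f (pv_minv_insert hM)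
        · intro x hx
          rcases List.mem_append.mp hx with h | h
          · exact hRc c hck x (List.mem_reverse.mp h)
          · exact hSCsb x h
        · rw [hrev]
          exact pv_rel_append (pv_rel_filter _ _)
            (pv_rel_mono (fun x hx => pv_contains_insert_mono hx) hrel')
        · exact pv_good_step hG hc'
        · unfold pvMu at hfA ⊢
          have h1 := List.length_filter_le (fun nb => !((M.insert c true).contains nb)) (pvAdj G c)
          simp at hfA ⊢
          omega
        · unfold pvMu at hk ⊢
          simp at hk ⊢
          omega
    | drop c sa sb hc hrel' =>
      rw [pv_run_skip G R hRk hRc hSC hc]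
      apply ih M SA sb fA hM (fun x hx => hSC x (List.mem_cons_of_mem _ hx)) hrel' hG hfA
      unfold pvMu at hk ⊢; simp at hk ⊢; omega

-- ---- the reach set: node ∈ pvReach, and under Pre_ it is adjacency-closed ----
theorem pv_mem_step_iff (G : List (Int × List Int)) (R : List Int) (x : Int) :
    x ∈ pvStep G R ↔ x ∈ R ∨ ∃ u ∈ R, x ∈ pvAdj G u := by
  simp [pvStep, List.mem_dedup, List.mem_append, List.mem_flatMap]

theorem pv_step_subset (G : List (Int × List Int)) (R : List Int) :
    ∀ x ∈ R, x ∈ pvStep G R := by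
  intro x hx; exact (pv_mem_step_iff G R x).mpr (Or.inl hx)

theorem pv_step_congr (G : List (Int × List Int)) {R R' : List Int}
    (h : ∀ x, x ∈ R ↔ x ∈ R') (x : Int) : x ∈ pvStep G R ↔ x ∈ pvStep G R' := by
  rw [pv_mem_step_iff, pv_mem_step_iff]
  constructor
  · rintro (hx | ⟨u, hu, hx⟩)
    · exact Or.inl ((h x).mp hx)
    · exact Or.inr ⟨u, (h u).mp hu, hx⟩
  · rintro (hx | ⟨u, hu, hx⟩)
    · exact Or.inl ((h x).mpr hx)
    · exact Or.inr ⟨u, (h u).mpr hu, hx⟩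

theorem pv_iter_mono (G : List (Int × List Int)) (node : Int) :
    ∀ i j, i ≤ j → ∀ x, x ∈ (pvStep G)^[i] [node] → x ∈ (pvStep G)^[j] [node] := by
  intro i j hij
  induction j with
  | zero =>
    intro x hx
    have : i = 0 := by omega
    subst this; exact hx
  | succ j ih =>
    intro x hx
    by_cases h : i = j + 1
    · subst h; exact hx
    · have hij' : i ≤ j := by omega
      rw [Function.iterate_succ_apply']
      exact pv_step_subset G _ x (ih hij' x hx)

theorem pv_node_mem_reach (G : List (Int × List Int)) (node : Int) :
    node ∈ pvReach G node := by
  unfold pvReach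
  exact pv_iter_mono G node 0 (G.length + 1) (by omega) node (List.mem_singleton.mpr rfl)

-- pigeonhole: some step before |G|+1 already reaches a (set-)fixpoint
theorem pv_exists_fix (G : List (Int × List Int)) (node : Int)
    (hPre : ∀ u ∈ pvReach G node, u ∈ pvKeys G) :
    ∃ i ≤ G.length, ∀ x, x ∈ (pvStep G)^[i + 1] [node] ↔ x ∈ (pvStep G)^[i] [node] := by
  by_contra hcon
  push_neg at hcon
  -- then the toFinset cardinalities grow strictly along the chain
  have hgrow : ∀ i, i ≤ G.length + 1 → i + 1 ≤ ((pvStep G)^[i] [node]).toFinset.card := by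
    intro i
    induction i with
    | zero => intro _; simp
    | succ i ih =>
      intro hi
      have hi' : i ≤ G.length := by omega
      rcases hcon i hi' with ⟨x, hx⟩
      have hx' : x ∈ (pvStep G)^[i+1] [node] ∧ x ∉ (pvStep G)^[i] [node] := by
        rcases hx with h | ⟨hnot, hin⟩
        · exact h
        · exact absurd (pv_iter_mono G node i (i+1) (by omega) x hin) hnot
      have hsub : ((pvStep G)^[i] [node]).toFinset ⊆ ((pvStep G)^[i+1] [node]).toFinset := by
        intro y hy
        rw [List.mem_toFinset] at *
        exact pv_iter_mono G node i (i+1) (by omega) y hy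
      have hne : ¬ ((pvStep G)^[i+1] [node]).toFinset ⊆ ((pvStep G)^[i] [node]).toFinset := by
        intro hs
        apply hx'.2
        have := hs (List.mem_toFinset.mpr hx'.1)
        exact List.mem_toFinset.mp this
      have hlt := Finset.card_lt_card (HasSubset.Subset.ssubset_of_not_subset hsub hne)
      have := ih (by omega)
      omega
  -- but every iterate is a subset of the keys, whose card is at most |G|
  have hcard : ((pvStep G)^[G.length + 1] [node]).toFinset.card ≤ G.length := by
    have hsub : ((pvStep G)^[G.length + 1] [node]).toFinset ⊆ (pvKeys G).toFinset := by
      intro y hy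
      rw [List.mem_toFinset] at *
      exact hPre y hy
    have h1 := Finset.card_le_card hsub
    have h2 : (pvKeys G).toFinset.card ≤ (pvKeys G).length := List.toFinset_card_le _
    have h3 : (pvKeys G).length = G.length := List.length_map _
    omega
  have := hgrow (G.length + 1) (le_refl _)
  omega

theorem pv_reach_closed (G : List (Int × List Int)) (node : Int)
    (hPre : ∀ u ∈ pvReach G node, u ∈ pvKeys G) :
    ∀ u ∈ pvReach G node, ∀ d ∈ pvAdj G u, d ∈ pvReach G node := by
  rcases pv_exists_fix G node hPre with ⟨i, hi, hfix⟩
  -- from the fixpoint on, all iterates have the same members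
  have hstable : ∀ j, i ≤ j → ∀ x, x ∈ (pvStep G)^[j] [node] ↔ x ∈ (pvStep G)^[i] [node] := by
    intro j hij
    induction j with
    | zero =>
      have : i = 0 := by omega
      subst this; intro x; rfl
    | succ j ih =>
      intro x
      by_cases h : i = j + 1
      · subst h; rfl
      · have hij' : i ≤ j := by omega
        rw [Function.iterate_succ_apply']
        rw [pv_step_congr G (ih hij') x]
        have h4 : pvStep G ((pvStep G)^[i] [node]) = (pvStep G)^[i+1] [node] :=
          (Function.iterate_succ_apply' _ _ _).symm
        rw [h4]
        exact hfix x
  intro u hu d hd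
  have hu' : u ∈ (pvStep G)^[i] [node] := (hstable (G.length + 1) (by omega) u).mp hu
  have hd' : d ∈ (pvStep G)^[i + 1] [node] := by
    rw [Function.iterate_succ_apply']
    exact (pv_mem_step_iff G _ d).mpr (Or.inr ⟨u, hu', hd⟩)
  exact (hstable (G.length + 1) (by omega) d).mpr ((hfix d).mp hd')

-- ===== VERDICT (by name: the statement is the Claim_ definition above) =====
theorem mark_component_spec : Claim_equal_mark_component := by
  intro G node _ hPre
  unfold Spec_mark_component mark_component mark_component_alt
  unfold Pre_mark_component at hPre
  have hRk : ∀ u ∈ pvReach G node, u ∈ pvKeys G := hPre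
  have hRc := pv_reach_closed G node hPre
  have hnode : node ∈ pvReach G node := pv_node_mem_reach G node
  have hminv : pvMinv PySem.Dict.empty := by
    intro p hp
    simp [PySem.Dict.empty] at hp
  have hcont : ∀ x : Int, (PySem.Dict.empty : PySem.Dict Int Bool).contains x = false := by
    intro x; exact PySem.Dict.contains_empty x
  have hSC : pvSC (pvReach G node) [node] := by
    intro x hx
    rcases List.mem_cons.mp hx with h | h
    · exact h ▸ hnode
    · cases h
  -- A's loop runs the canonical pending loop
  have hA : pvLoopA G (1 + pvWsum G PySem.Dict.empty) PySem.Dict.empty [node]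
      = pvRun G PySem.Dict.empty [node] := by
    apply pv_sim G (pvReach G node) hRk hRc (pvMu G PySem.Dict.empty [node]) _ _ _ _ hminv hSC
      (PvRel.cons node _ _ PvRel.nil)
    · intro pre c post _ hc
      simp [hcont] at hc
    · unfold pvMu; simp
    · exact le_refl _
  -- B's recursion runs the same pending loop
  have hnu : pvNu G PySem.Dict.empty ≤ G.length + 1 := by
    unfold pvNu
    have h1 : ((pvKeys G).dedup.filter
          (fun u => !((PySem.Dict.empty : PySem.Dict Int Bool).contains u))).length
        ≤ (pvKeys G).dedup.length := List.length_filter_le _ _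
    have h2 : (pvKeys G).dedup.length ≤ (pvKeys G).length :=
      List.Sublist.length_le (List.dedup_sublist _)
    have h3 : (pvKeys G).length = G.length := List.length_map _
    omega
  have hB : pvRun G PySem.Dict.empty [node]
      = pvDfs G (G.length + 1) node PySem.Dict.empty := by
    rw [pv_bridge G (pvReach G node) hRk hRc (G.length + 1) node PySem.Dict.empty [] hminv hnode
        (fun x hx => by cases hx) (hcont node) hnu]
    exact pv_run_nil G _
  rw [hA, hB]
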